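-- pv_equiv track=rewrite | github.com/kalyaniuniversity/pytoolkit | util.py | get_label_separated_attributes
-- ===== SOURCE A (Python) =====
-- from typing import List, Union
-- import copy
--
-- def get_label_separated_attributes(attribute_list: List[float], classlabels: List[str], unique_classlabels: List[str]) -> List[List[float]]:
--
-- 	label_separated_attributes: List[List[float]] = list()
--
-- 	for label in unique_classlabels:
--
-- 		similar_labeled_attributes: List[float] = list()
--
-- 		for i in range(0, len(attribute_list)):
-- 			if classlabels[i] == label:
-- 				similar_labeled_attributes.append(attribute_list[i])
--
-- 		label_separated_attributes.append(copy.deepcopy(similar_labeled_attributes))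
--
-- 	return label_separated_attributes
-- ===== SOURCE B (Python) =====
-- def get_label_separated_attributes(attribute_list, classlabels, unique_classlabels):
--     # Single pass: group values by label in a dict, then emit in unique_classlabels order.
--     groups = {}
--     for label, value in zip(classlabels, attribute_list):
--         groups.setdefault(label, []).append(value)
--     return [list(groups.get(label, [])) for label in unique_classlabels]
-- ===== Notes on version B (the rewrite author's own statement) =====
-- stated objective: faster
-- what changed: Replaces the per-unique-label rescan of the whole attribute list by one pass building a dict label->values, then emitting groups in unique_classlabels order.
import Mathlib
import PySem

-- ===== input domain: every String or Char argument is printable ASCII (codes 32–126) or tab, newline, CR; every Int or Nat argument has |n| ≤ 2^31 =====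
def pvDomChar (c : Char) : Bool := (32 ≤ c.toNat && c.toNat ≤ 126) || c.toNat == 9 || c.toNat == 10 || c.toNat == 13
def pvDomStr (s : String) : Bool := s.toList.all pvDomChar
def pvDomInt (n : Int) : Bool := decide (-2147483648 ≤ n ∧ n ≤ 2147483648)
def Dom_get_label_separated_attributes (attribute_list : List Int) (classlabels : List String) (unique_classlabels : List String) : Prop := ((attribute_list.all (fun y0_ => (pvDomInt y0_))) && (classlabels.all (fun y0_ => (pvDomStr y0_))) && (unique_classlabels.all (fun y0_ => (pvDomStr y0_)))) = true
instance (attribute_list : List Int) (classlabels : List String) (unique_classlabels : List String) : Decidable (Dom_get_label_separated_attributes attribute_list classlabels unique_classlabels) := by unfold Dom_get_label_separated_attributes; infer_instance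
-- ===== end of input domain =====

-- B replaces A's per-unique-label rescan of the attribute list by one dict-grouping pass; equivalence proved on inputs where classlabels covers attribute_list.


-- ===== PORT A =====
-- Literal port of A: for each unique label, scan all indices of attribute_list and
-- collect attribute_list[i] where classlabels[i] == label.  Indexing is via pyGetD;
-- the "" / 0 defaults are never reached: i < attribute_list.length always, and
-- i < classlabels.length is exactly Pre_ (Python raises IndexError outside it).
-- copy.deepcopy of a list of ints is value-identity.
def get_label_separated_attributes (attribute_list : List Int) (classlabels : List String) (unique_classlabels : List String) : List (List Int) :=
  unique_classlabels.foldl (fun acc label =>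
    acc ++ [((PySem.List.pyRange 0 (PySem.List.len attribute_list)).foldl
      (fun s i => if PySem.List.pyGetD classlabels i "" == label then s ++ [PySem.List.pyGetD attribute_list i 0] else s) [])]) []

-- ===== PORT B =====
-- Literal port of B: one pass over zip(classlabels, attribute_list) grouping into a dict
-- (setdefault(k, []).append(v) == modify k [] (· ++ [v])), then emit per unique label.
-- list(...) in B copies a list of ints: value-identity.
def get_label_separated_attributes_alt (attribute_list : List Int) (classlabels : List String) (unique_classlabels : List String) : List (List Int) :=
  let groups := (classlabels.zip attribute_list).foldl
    (fun d p => d.modify p.1 ([] : List Int) (fun l => l ++ [p.2])) PySem.Dict.empty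
  unique_classlabels.map (fun label => groups.getD label [])

-- ===== PRECONDITION & SPEC =====
-- Pre_ excludes exactly the inputs where A raises IndexError (classlabels[i] beyond its length,
-- reached whenever the outer loop runs at all, i.e. unique_classlabels ≠ []).
def Pre_get_label_separated_attributes (attribute_list : List Int) (classlabels : List String) (unique_classlabels : List String) : Prop :=
  attribute_list.length ≤ classlabels.length ∨ unique_classlabels = []
instance (attribute_list : List Int) (classlabels : List String) (unique_classlabels : List String) : Decidable (Pre_get_label_separated_attributes attribute_list classlabels unique_classlabels) := by unfold Pre_get_label_separated_attributes; infer_instance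

def pvWitness_get_label_separated_attributes : List Int × List String × List String := ([1, 2, 3], (["a", "b", "a"], ["a", "b"]))


def Spec_get_label_separated_attributes (attribute_list : List Int) (classlabels : List String) (unique_classlabels : List String) (out : List (List Int)) : Prop := out = get_label_separated_attributes_alt attribute_list classlabels unique_classlabels
instance (attribute_list : List Int) (classlabels : List String) (unique_classlabels : List String) (out : List (List Int)) : Decidable (Spec_get_label_separated_attributes attribute_list classlabels unique_classlabels out) := by unfold Spec_get_label_separated_attributes; infer_instance

-- ===== CLAIM (what is proved, stated in full; the proofs are below) =====
def Claim_equal_get_label_separated_attributes : Prop := ∀ (attribute_list : List Int) (classlabels : List String) (unique_classlabels : List String), Dom_get_label_separated_attributes attribute_list classlabels unique_classlabels → Pre_get_label_separated_attributes attribute_list classlabels unique_classlabels → Spec_get_label_separated_attributes attribute_list classlabels unique_classlabels (get_label_separated_attributes attribute_list classlabels unique_classlabels)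

-- ===== LEMMAS AND PROOFS =====

-- A's inner index loop collects exactly the zip-filtered values, given the length precondition.
lemma inner_loop_eq (attribute_list : List Int) (classlabels : List String)
    (h : attribute_list.length ≤ classlabels.length) (label : String) :
    (PySem.List.pyRange 0 (PySem.List.len attribute_list)).foldl
      (fun s i => if PySem.List.pyGetD classlabels i "" == label then s ++ [PySem.List.pyGetD attribute_list i 0] else s) []
    = ((classlabels.zip attribute_list).filter (fun p => p.1 == label)).map (fun p => p.2) := by
  have hlen : (classlabels.zip attribute_list).length = attribute_list.length := by
    simp [List.length_zip]; omega
  have h1 : PySem.List.len attribute_list = PySem.List.len (classlabels.zip attribute_list) := by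
    simp [PySem.List.len, hlen]
  rw [h1]
  have hcongr := PySem.List.foldl_congr_mem
      (PySem.List.pyRange 0 (PySem.List.len (classlabels.zip attribute_list)))
      (fun (s : List Int) (i : Int) => if PySem.List.pyGetD classlabels i "" == label then s ++ [PySem.List.pyGetD attribute_list i 0] else s)
      (fun (s : List Int) (i : Int) =>
        (fun (s : List Int) (p : String × Int) => if p.1 == label then s ++ [p.2] else s) s
          (PySem.List.pyGetD (classlabels.zip attribute_list) i ("", 0)))
      []
      (by
        intro acc i hi
        rw [PySem.List.mem_pyRange_one] at hi
        simp only [PySem.List.len] at hi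
        obtain ⟨h0, h2⟩ := hi
        have hz : i < ((classlabels.zip attribute_list).length : Int) := by exact_mod_cast h2
        have hia : i < (attribute_list.length : Int) := by omega
        have hic : i < (classlabels.length : Int) := by
          have := h; omega
        simp only [PySem.List.pyGetD_eq_getElem _ _ h0 hz,
            PySem.List.pyGetD_eq_getElem (classlabels) ("") h0 hic,
            PySem.List.pyGetD_eq_getElem (attribute_list) (0) h0 hia,
            List.getElem_zip])
  rw [hcongr, PySem.List.foldl_pyRange_pyGetD (classlabels.zip attribute_list) ("", 0)
      (fun (s : List Int) (p : String × Int) => if p.1 == label then s ++ [p.2] else s) [] (le_refl 0)]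
  rw [Int.toNat_zero, List.drop_zero]
  exact PySem.List.foldl_append_if _ _ _ []

-- ===== VERDICT (by name: the statement is the Claim_ definition above) =====
theorem get_label_separated_attributes_spec : Claim_equal_get_label_separated_attributes := by
  intro attribute_list classlabels unique_classlabels _hd hpre
  unfold Spec_get_label_separated_attributes
  rcases hpre with hpre | rfl
  case inr => rfl
  unfold get_label_separated_attributes get_label_separated_attributes_alt
  rw [PySem.List.foldl_append_singleton_eq_map]
  simp only [List.nil_append]
  apply List.map_congr_left
  intro label _
  rw [inner_loop_eq attribute_list classlabels hpre label,
      PySem.Dict.getD_foldl_modify_append]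
  simp [PySem.Dict.getD_empty]
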